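-- pv_equiv track=rewrite | github.com/rhkdguskim/Study | Algorithm/python/programers/단어퍼즐.py | solution
-- ===== SOURCE A (Python) =====
-- def solution(strs, t):
--     dp = {}
--     n = len(t)
--     for s in strs:
--         dp[s] = 1
--
--     while t not in dp:
--         new_dp = {}
--         for key in dp.keys():
--             for s in strs:
--                 new_key = key + s
--                 new_length = len(new_key)
--                 cost = dp[key] + 1
--                 if n >= new_length and t[:new_length] == new_key:
--                     if new_key not in new_dp:
--                         new_dp[new_key] = cost
--                     else:
--                         if new_dp[new_key] > cost:
--                             new_dp[new_key] = cost
--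
--         if len(new_dp) == 0:
--             return -1
--
--         dp = new_dp
--
--     return dp[t]
-- ===== SOURCE B (Python) =====
-- def solution(strs, t):
--     n = len(t)
--     INF = n + 1
--     best = [0]
--     for i in range(1, n + 1):
--         b = INF
--         for s in strs:
--             L = len(s)
--             if 0 < L <= i and t[i-L:i] == s and best[i-L] + 1 < b:
--                 b = best[i-L] + 1
--         best.append(b)
--     return best[n] if best[n] < INF else -1
-- ===== Notes on version B (the rewrite author's own statement) =====
-- stated objective: faster
-- what changed: Replaced the layered BFS over a dict of concatenated prefix strings (each layer re-slicing and comparing whole prefixes of t) by a 1-D DP over prefix lengths of t that checks each piece as a suffix of the current prefix, so no prefix string is ever materialised.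
-- outside the precondition, e.g. on solution([], ''): A returns -1, B returns 0; on solution(['a'], ''): A returns -1, B returns 0; on solution([''], ''): A returns 1, B returns 0
import Mathlib
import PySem

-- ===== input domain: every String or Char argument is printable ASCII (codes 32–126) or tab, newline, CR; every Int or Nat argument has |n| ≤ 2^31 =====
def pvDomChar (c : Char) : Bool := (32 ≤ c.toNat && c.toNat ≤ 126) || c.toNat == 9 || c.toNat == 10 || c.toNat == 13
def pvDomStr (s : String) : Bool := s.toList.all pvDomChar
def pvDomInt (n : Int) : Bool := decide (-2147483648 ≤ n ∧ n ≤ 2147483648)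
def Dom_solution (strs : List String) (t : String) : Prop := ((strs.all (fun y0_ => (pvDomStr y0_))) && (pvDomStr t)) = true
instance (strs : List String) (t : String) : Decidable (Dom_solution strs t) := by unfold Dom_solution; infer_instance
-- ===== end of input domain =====

-- B replaces A's layered BFS over a dict of concatenated prefix strings by a 1-D DP over prefix
-- lengths of t (objective: faster — no prefix string is ever materialised or hashed).

-- ===== PORT A =====
-- Python strings are carried as their character lists (List Char) throughout both ports.
-- Python's dp[key] is ported as getD: the key is always drawn from dp.keys, so KeyError cannot fire.
def aInner (S : List (List Char)) (T : List Char) (n : Int)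
    (dp : PySem.Dict (List Char) Int) (key : List Char)
    (nd : PySem.Dict (List Char) Int) : PySem.Dict (List Char) Int :=
  S.foldl (fun nd s =>
    let nk := key ++ s
    let nl : Int := nk.length
    let cost : Int := dp.getD key 0 + 1
    if n ≥ nl ∧ PySem.List.slice T none (some nl) = nk then
      match nd.get? nk with
      | none => nd.insert nk cost
      | some v => if v > cost then nd.insert nk cost else nd
    else nd) nd

def aStep (S : List (List Char)) (T : List Char) (n : Int)
    (dp : PySem.Dict (List Char) Int) : PySem.Dict (List Char) Int :=
  (dp.keys).foldl (fun nd key => aInner S T n dp key nd) PySem.Dict.empty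

-- the while loop; the fuel guard only makes it total: length t + 1 rounds always
-- suffice on the admitted inputs (proved below), so the 0-fuel branch is never taken there
def aLoop (S : List (List Char)) (T : List Char) (n : Int) :
    Nat → PySem.Dict (List Char) Int → Int
  | 0, _ => -1
  | fuel+1, dp =>
    match dp.get? T with
    | some v => v
    | none =>
      let nd := aStep S T n dp
      if nd.size = 0 then -1 else aLoop S T n fuel nd

def solution (strs : List String) (t : String) : Int :=
  let S := strs.map String.toList
  let T := t.toList
  let dp := S.foldl (fun d s => d.insert s 1) PySem.Dict.empty
  aLoop S T (T.length : Int) (T.length + 1) dp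

-- ===== PORT B =====
-- best[i-L] is ported as pyGetD: the branch guarantees 0 ≤ i-L < len best, so it is Python's best[i-L]
def bInner (S : List (List Char)) (T : List Char) (best : List Int) (i : Int) (INF : Int) : Int :=
  S.foldl (fun b s =>
    let L : Int := s.length
    if 0 < L ∧ L ≤ i ∧ PySem.List.slice T (some (i - L)) (some i) = s ∧
        PySem.List.pyGetD best (i - L) 0 + 1 < b then
      PySem.List.pyGetD best (i - L) 0 + 1
    else b) INF

def solution_alt (strs : List String) (t : String) : Int :=
  let S := strs.map String.toList
  let T := t.toList
  let n := T.length
  let INF : Int := (n : Int) + 1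
  let best := (PySem.List.pyRange 1 ((n : Int) + 1) 1).foldl
    (fun best i => best ++ [bInner S T best i INF]) [(0 : Int)]
  if PySem.List.pyGetD best (n : Int) 0 < INF then PySem.List.pyGetD best (n : Int) 0 else -1

-- ===== PRECONDITION & SPEC =====
-- Pre_ excludes the empty target t (a 0-piece corner no one specifies: A answers -1, or 1 when "" is a
-- piece, while B naturally answers 0 pieces) and piece lists containing the empty string (A's while
-- loop never terminates when such a target is unreachable).
def Pre_solution (strs : List String) (t : String) : Prop := t ≠ "" ∧ "" ∉ strs
instance (strs : List String) (t : String) : Decidable (Pre_solution strs t) := by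
  unfold Pre_solution; infer_instance

def pvWitness_solution : List String × String := (["ab", "c"], "abc")

def Spec_solution (strs : List String) (t : String) (out : Int) : Prop := out = solution_alt strs t
instance (strs : List String) (t : String) (out : Int) : Decidable (Spec_solution strs t out) := by
  unfold Spec_solution; infer_instance

-- ===== CLAIM (what is proved, stated in full; the proofs are below) =====
def Claim_equal_solution : Prop := ∀ (strs : List String) (t : String), Dom_solution strs t → Pre_solution strs t → Spec_solution strs t (solution strs t)

-- ===== LEMMAS AND PROOFS =====


inductive Reach (S : List (List Char)) : Nat → List Char → Prop
  | nil : Reach S 0 []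
  | snoc {k : Nat} {w s : List Char} : s ∈ S → Reach S k w → Reach S (k+1) (w ++ s)

def reachB (S : List (List Char)) : Nat → List Char → Bool
  | 0, w => w.isEmpty
  | k+1, w => S.any fun s => s.isSuffixOf w && reachB S k (w.take (w.length - s.length))

lemma reachB_iff (S : List (List Char)) (k : Nat) (w : List Char) :
    reachB S k w = true ↔ Reach S k w := by
  induction k generalizing w with
  | zero =>
    simp only [reachB, List.isEmpty_iff]
    constructor
    · rintro rfl; exact Reach.nil
    · rintro h; cases h; rfl
  | succ k ih =>
    simp only [reachB, List.any_eq_true, Bool.and_eq_true, List.isSuffixOf_iff_suffix]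
    constructor
    · rintro ⟨s, hs, ⟨w', rfl⟩, hr⟩
      have htake : (w' ++ s).take ((w' ++ s).length - s.length) = w' := by
        simp [List.take_left']
      rw [htake] at hr
      exact Reach.snoc hs (ih _ |>.mp hr)
    · rintro h
      cases h with
      | snoc hs hr =>
        rename_i w' s
        refine ⟨s, hs, ⟨w', rfl⟩, ?_⟩
        have htake : (w' ++ s).take ((w' ++ s).length - s.length) = w' := by
          simp [List.take_left']
        rw [htake]
        exact (ih _).mpr hr

lemma reach_le_length (S : List (List Char)) (k : Nat) (w : List Char)
    (hS : ∀ s ∈ S, s ≠ []) (h : Reach S k w) : k ≤ w.length := by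
  induction h with
  | nil => simp
  | snoc hs hr ih =>
    rename_i k' w' s
    have : s.length ≠ 0 := by simpa [List.length_eq_zero_iff] using hS s hs
    simp only [List.length_append]; omega

lemma reach_prefix (S : List (List Char)) (k m : Nat) (w : List Char)
    (h : Reach S k w) (hm : m ≤ k) : ∃ w', w' <+: w ∧ Reach S m w' := by
  induction h generalizing m with
  | nil => exact ⟨[], by simpa using Nat.le_zero.mp hm ▸ Reach.nil⟩
  | snoc hs hr ih =>
    rename_i k' w' s
    rcases Nat.lt_or_ge m (k' + 1) with hlt | hge
    · obtain ⟨w'', hpre, hr'⟩ := ih m (Nat.lt_succ_iff.mp hlt)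
      exact ⟨w'', hpre.trans (List.prefix_append _ _), hr'⟩
    · have : m = k' + 1 := le_antisymm hm hge
      subst this
      exact ⟨w' ++ s, List.prefix_refl _, Reach.snoc hs hr⟩

lemma reach_one (S : List (List Char)) (w : List Char) : Reach S 1 w ↔ w ∈ S := by
  constructor
  · rintro h
    cases h with
    | snoc hs hr => cases hr; simpa using hs
  · intro h
    simpa using Reach.snoc h Reach.nil

lemma reach_zero (S : List (List Char)) (w : List Char) (h : Reach S 0 w) : w = [] := by
  cases h; rfl

lemma reach_succ_iff (S : List (List Char)) (k : Nat) (w : List Char) :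
    Reach S (k+1) w ↔ ∃ w' s, s ∈ S ∧ Reach S k w' ∧ w = w' ++ s := by
  constructor
  · rintro h
    cases h with
    | snoc hs hr => exact ⟨_, _, hs, hr, rfl⟩
  · rintro ⟨w', s, hs, hr, rfl⟩
    exact Reach.snoc hs hr

def okP (T : List Char) (n : Int) (w : List Char) : Prop :=
  n ≥ (w.length : Int) ∧ PySem.List.slice T none (some ((w.length : Int))) = w

lemma okP_iff (T w : List Char) : okP T (T.length : Int) w ↔ w <+: T := by
  unfold okP
  rw [PySem.List.slice_to_natCast]
  constructor
  · rintro ⟨hle, htake⟩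
    exact htake ▸ List.take_prefix _ _
  · intro h
    refine ⟨by exact_mod_cast Nat.cast_le.mpr h.length_le, ?_⟩
    exact (List.prefix_iff_eq_take.mp h).symm

def condInner (S : List (List Char)) (T : List Char) (n : Int) (key w : List Char) : Prop :=
  ∃ s ∈ S, w = key ++ s ∧ okP T n w

lemma aInner_body (T : List Char) (n : Int) (dp : PySem.Dict (List Char) Int)
    (key s : List Char) (nd : PySem.Dict (List Char) Int) (c : Int)
    (hkey : dp.getD key 0 + 1 = c)
    (hnd : ∀ x v, nd.get? x = some v → v = c) :
    let nd1 := (if n ≥ (((key ++ s).length : Nat) : Int) ∧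
        PySem.List.slice T none (some (((key ++ s).length : Nat) : Int)) = key ++ s then
      match nd.get? (key ++ s) with
      | none => nd.insert (key ++ s) (dp.getD key 0 + 1)
      | some v => if v > dp.getD key 0 + 1 then nd.insert (key ++ s) (dp.getD key 0 + 1) else nd
    else nd)
    (∀ x v, nd1.get? x = some v → v = c) ∧
    (∀ w, nd1.get? w = some c ↔ ((w = key ++ s ∧ okP T n w) ∨ nd.get? w = some c)) ∧
    (∀ w, nd1.get? w = none ↔ (¬ (w = key ++ s ∧ okP T n w) ∧ nd.get? w = none)) := by
  intro nd1
  by_cases hc : n ≥ (((key ++ s).length : Nat) : Int) ∧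
      PySem.List.slice T none (some (((key ++ s).length : Nat) : Int)) = key ++ s
  · have hok : okP T n (key ++ s) := hc
    cases hg : nd.get? (key ++ s) with
    | none =>
      have hnd1 : nd1 = nd.insert (key ++ s) (dp.getD key 0 + 1) := by
        simp only [nd1, if_pos hc, hg]
      rw [hnd1, hkey]
      refine ⟨?_, ?_, ?_⟩
      · intro x v hx
        rw [PySem.Dict.get?_insert] at hx
        split_ifs at hx with hxk
        · exact (Option.some_inj.mp hx).symm
        · exact hnd x v hx
      · intro w
        rw [PySem.Dict.get?_insert]
        split_ifs with hxk
        · subst hxk; simp [hok]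
        · simp [hxk]
      · intro w
        rw [PySem.Dict.get?_insert]
        split_ifs with hxk
        · subst hxk; simp [hok]
        · simp [hxk]
    | some v =>
      have hv : v = c := hnd _ _ hg
      have hnd1 : nd1 = nd := by
        simp only [nd1, if_pos hc, hg, hv, ← hkey]
        simp
      rw [hnd1]
      refine ⟨hnd, ?_, ?_⟩
      · intro w
        constructor
        · exact fun h => Or.inr h
        · rintro (⟨rfl, _⟩ | h)
          · rw [hg, hv]
          · exact h
      · intro w
        constructor
        · intro h
          refine ⟨?_, h⟩
          rintro ⟨rfl, _⟩
          rw [hg] at h; simp at h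
        · exact fun h => h.2
  · have hnd1 : nd1 = nd := by simp only [nd1, if_neg hc]
    rw [hnd1]
    have hnc : ¬ (key ++ s).length ≤ n ∨ True := Or.inr trivial
    refine ⟨hnd, ?_, ?_⟩
    · intro w
      constructor
      · exact fun h => Or.inr h
      · rintro (⟨rfl, hok⟩ | h)
        · exact absurd hok hc
        · exact h
    · intro w
      constructor
      · intro h
        refine ⟨?_, h⟩
        rintro ⟨rfl, hok⟩
        exact hc hok
      · exact fun h => h.2

lemma aInner_get (S : List (List Char)) (T : List Char) (n : Int)
    (dp : PySem.Dict (List Char) Int) (key : List Char) (nd : PySem.Dict (List Char) Int)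
    (c : Int) (hkey : dp.getD key 0 + 1 = c)
    (hnd : ∀ x v, nd.get? x = some v → v = c) :
    (∀ x v, (aInner S T n dp key nd).get? x = some v → v = c) ∧
    (∀ w, (aInner S T n dp key nd).get? w = some c ↔
      (condInner S T n key w ∨ nd.get? w = some c)) ∧
    (∀ w, (aInner S T n dp key nd).get? w = none ↔
      (¬ condInner S T n key w ∧ nd.get? w = none)) := by
  induction S generalizing nd with
  | nil =>
    refine ⟨hnd, ?_, ?_⟩ <;> intro w <;> simp [aInner, condInner]
  | cons s S' ih =>
    have hbody := aInner_body T n dp key s nd c hkey hnd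
    set nd1 := (if n ≥ (((key ++ s).length : Nat) : Int) ∧
        PySem.List.slice T none (some (((key ++ s).length : Nat) : Int)) = key ++ s then
      match nd.get? (key ++ s) with
      | none => nd.insert (key ++ s) (dp.getD key 0 + 1)
      | some v => if v > dp.getD key 0 + 1 then nd.insert (key ++ s) (dp.getD key 0 + 1) else nd
    else nd) with hnd1def
    obtain ⟨h1, h2, h3⟩ := hbody
    have hfold : aInner (s :: S') T n dp key nd = aInner S' T n dp key nd1 := rfl
    obtain ⟨g1, g2, g3⟩ := ih nd1 h1
    have hcond : ∀ w, condInner (s :: S') T n key w ↔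
        ((w = key ++ s ∧ okP T n w) ∨ condInner S' T n key w) := by
      intro w
      simp only [condInner, List.mem_cons]
      constructor
      · rintro ⟨x, (rfl | hx), hw⟩
        · exact Or.inl hw
        · exact Or.inr ⟨x, hx, hw⟩
      · rintro (hw | ⟨x, hx, hw⟩)
        · exact ⟨s, Or.inl rfl, hw⟩
        · exact ⟨x, Or.inr hx, hw⟩
    rw [hfold]
    refine ⟨g1, ?_, ?_⟩
    · intro w
      rw [g2 w, h2 w, hcond w]
      tauto
    · intro w
      rw [g3 w, h3 w, hcond w]
      tauto

lemma aOuter_get (S : List (List Char)) (T : List Char) (n : Int)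
    (dp : PySem.Dict (List Char) Int) (keys' : List (List Char))
    (nd : PySem.Dict (List Char) Int) (c : Int)
    (hkeys : ∀ key ∈ keys', dp.getD key 0 + 1 = c)
    (hnd : ∀ x v, nd.get? x = some v → v = c) :
    (∀ x v, ((keys'.foldl (fun nd key => aInner S T n dp key nd) nd)).get? x = some v → v = c) ∧
    (∀ w, (keys'.foldl (fun nd key => aInner S T n dp key nd) nd).get? w = some c ↔
      ((∃ key ∈ keys', condInner S T n key w) ∨ nd.get? w = some c)) ∧
    (∀ w, (keys'.foldl (fun nd key => aInner S T n dp key nd) nd).get? w = none ↔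
      (¬ (∃ key ∈ keys', condInner S T n key w) ∧ nd.get? w = none)) := by
  induction keys' generalizing nd with
  | nil => refine ⟨hnd, ?_, ?_⟩ <;> intro w <;> simp
  | cons key keys ih =>
    obtain ⟨h1, h2, h3⟩ := aInner_get S T n dp key nd c (hkeys key (by simp)) hnd
    obtain ⟨g1, g2, g3⟩ := ih (aInner S T n dp key nd)
      (fun k hk => hkeys k (List.mem_cons_of_mem _ hk)) h1
    have hcond : ∀ w, (∃ k ∈ key :: keys, condInner S T n k w) ↔
        (condInner S T n key w ∨ ∃ k ∈ keys, condInner S T n k w) := by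
      intro w
      constructor
      · rintro ⟨x, hx, hw⟩
        rcases List.mem_cons.mp hx with rfl | hx'
        · exact Or.inl hw
        · exact Or.inr ⟨x, hx', hw⟩
      · rintro (hw | ⟨x, hx, hw⟩)
        · exact ⟨key, by simp, hw⟩
        · exact ⟨x, List.mem_cons_of_mem _ hx, hw⟩
    have hfold : (key :: keys).foldl (fun nd key => aInner S T n dp key nd) nd
        = keys.foldl (fun nd key => aInner S T n dp key nd) (aInner S T n dp key nd) := rfl
    rw [hfold]
    refine ⟨g1, ?_, ?_⟩
    · intro w
      rw [g2 w, h2 w, hcond w]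
      constructor
      · rintro (h | h | h)
        · exact Or.inl (Or.inr h)
        · exact Or.inl (Or.inl h)
        · exact Or.inr h
      · rintro ((h | h) | h)
        · exact Or.inr (Or.inl h)
        · exact Or.inl h
        · exact Or.inr (Or.inr h)
    · intro w
      rw [g3 w, h3 w, hcond w]
      constructor
      · rintro ⟨hA, hB, hC⟩
        exact ⟨fun h => h.elim hB hA, hC⟩
      · rintro ⟨hAB, hC⟩
        exact ⟨fun h => hAB (Or.inr h), fun h => hAB (Or.inl h), hC⟩

lemma aInit_get_aux (S : List (List Char)) (d : PySem.Dict (List Char) Int) (w : List Char) :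
    (S.foldl (fun d s => d.insert s 1) d).get? w
      = if w ∈ S then some 1 else d.get? w := by
  induction S generalizing d with
  | nil => simp
  | cons s S' ih =>
    rw [List.foldl_cons, ih]
    rw [PySem.Dict.get?_insert]
    by_cases hw : w ∈ S'
    · simp [hw]
    · by_cases hws : w = s <;> simp [hw, hws]


def Phi (S : List (List Char)) (T : List Char) : Nat → List Char → Prop
  | 0, w => w ∈ S
  | j+1, w => w <+: T ∧ Reach S (j+2) w

def InvA (S : List (List Char)) (T : List Char) (j : Nat) (dp : PySem.Dict (List Char) Int) : Prop :=
  (∀ w : List Char, dp.get? w = some ((j : Int)+1) ↔ Phi S T j w) ∧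
  (∀ w v, dp.get? w = some v → v = (j : Int)+1)

lemma phi_step (S : List (List Char)) (T : List Char) (j : Nat) (w : List Char) :
    (∃ key, Phi S T j key ∧ ∃ s ∈ S, w = key ++ s ∧ w <+: T) ↔ Phi S T (j+1) w := by
  constructor
  · rintro ⟨key, hPhi, s, hs, rfl, hpre⟩
    have hr : Reach S (j+1) key := by
      cases j with
      | zero => exact (reach_one S key).mpr hPhi
      | succ j' => exact hPhi.2
    exact ⟨hpre, Reach.snoc hs hr⟩
  · rintro ⟨hpre, hr⟩
    obtain ⟨w', s, hs, hr', rfl⟩ := (reach_succ_iff S (j+1) w).mp hr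
    refine ⟨w', ?_, s, hs, rfl, hpre⟩
    cases j with
    | zero => exact (reach_one S w').mp hr'
    | succ j' => exact ⟨(List.prefix_append _ _).trans hpre, hr'⟩

lemma aStep_inv (S : List (List Char)) (T : List Char) (j : Nat)
    (dp : PySem.Dict (List Char) Int) (hInv : InvA S T j dp) :
    InvA S T (j+1) (aStep S T (T.length : Int) dp) := by
  obtain ⟨hmem, hval⟩ := hInv
  have hc : ((j : Int)+1) + 1 = ((j+1 : Nat) : Int) + 1 := by push_cast; ring
  have hkeys : ∀ key ∈ dp.keys, dp.getD key 0 + 1 = ((j+1 : Nat) : Int) + 1 := by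
    intro key hk
    have hne : dp.get? key ≠ none := by
      intro hn
      rw [PySem.Dict.get?_eq_none_iff_not_mem_keys] at hn; exact hn hk
    cases hg : dp.get? key with
    | none => exact absurd hg hne
    | some v =>
      have := hval key v hg
      rw [PySem.Dict.getD_eq_get?_getD, hg]
      simp only [Option.getD_some, this]
      omega
  have hnd0 : ∀ (x : List Char) (v : Int),
      (PySem.Dict.empty : PySem.Dict (List Char) Int).get? x = some v → v = ((j+1 : Nat) : Int) + 1 := by
    intro x v hx; rw [PySem.Dict.get?_empty] at hx; exact absurd hx (by simp)
  obtain ⟨g1, g2, g3⟩ := aOuter_get S T (T.length : Int) dp dp.keys PySem.Dict.empty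
    (((j+1 : Nat) : Int) + 1) hkeys hnd0
  have hex : ∀ w, (∃ key ∈ dp.keys, condInner S T (T.length : Int) key w) ↔ Phi S T (j+1) w := by
    intro w
    rw [← phi_step S T j w]
    constructor
    · rintro ⟨key, hk, s, hs, rfl, hok⟩
      refine ⟨key, ?_, s, hs, rfl, (okP_iff T _).mp hok⟩
      have hne : dp.get? key ≠ none := by
        intro hn
        rw [PySem.Dict.get?_eq_none_iff_not_mem_keys] at hn; exact hn hk
      cases hg : dp.get? key with
      | none => exact absurd hg hne
      | some v =>
        have hv := hval key v hg
        subst hv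
        exact (hmem key).mp hg
    · rintro ⟨key, hPhi, s, hs, rfl, hpre⟩
      have hg : dp.get? key = some ((j : Int)+1) := (hmem key).mpr hPhi
      have hk : key ∈ dp.keys := by
        by_contra hk
        have := (PySem.Dict.get?_eq_none_iff_not_mem_keys (d := dp) (k := key)).mpr hk
        rw [hg] at this; simp at this
      exact ⟨key, hk, s, hs, rfl, (okP_iff T _).mpr hpre⟩
  constructor
  · intro w
    have := g2 w
    rw [PySem.Dict.get?_empty] at this
    rw [aStep, this, hex w]
    simp
  · intro w v hw
    exact g1 w v hw

-- B-side: minimal piece count for the length-i prefix of T (T.length + 1 when unreachable)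
noncomputable def mvN (S : List (List Char)) (T : List Char) (i : Nat) : Nat :=
  @dite _ (∃ k, reachB S k (T.take i) = true) (Classical.propDecidable _)
    (fun h => Nat.find h) (fun _ => T.length + 1)

lemma mvN_eq_find (S : List (List Char)) (T : List Char) (i : Nat)
    (h : ∃ k, reachB S k (T.take i) = true) : mvN S T i = Nat.find h := by
  unfold mvN; rw [dif_pos h]

lemma mvN_eq_top (S : List (List Char)) (T : List Char) (i : Nat)
    (h : ¬ ∃ k, reachB S k (T.take i) = true) : mvN S T i = T.length + 1 := by
  unfold mvN; rw [dif_neg h]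

lemma mvN_reach (S : List (List Char)) (T : List Char) (i : Nat)
    (h : ∃ k, reachB S k (T.take i) = true) : Reach S (mvN S T i) (T.take i) := by
  rw [mvN_eq_find S T i h]
  exact (reachB_iff _ _ _).mp (Nat.find_spec h)

lemma mvN_le_of_reach (S : List (List Char)) (T : List Char) (i k : Nat)
    (hk : Reach S k (T.take i)) : mvN S T i ≤ k := by
  have h : ∃ k, reachB S k (T.take i) = true := ⟨k, (reachB_iff _ _ _).mpr hk⟩
  rw [mvN_eq_find S T i h]
  exact Nat.find_le ((reachB_iff _ _ _).mpr hk)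

lemma mvN_zero (S : List (List Char)) (T : List Char) : mvN S T 0 = 0 := by
  have h : ∃ k, reachB S k (T.take 0) = true := ⟨0, by simp [reachB]⟩
  rw [mvN_eq_find S T 0 h, Nat.find_eq_zero]
  simp [reachB]

lemma foldl_min_le_init (l : List Int) (b : Int) : l.foldl min b ≤ b := by
  induction l generalizing b with
  | nil => simp
  | cons x l ih => exact le_trans (ih _) (min_le_left _ _)

lemma foldl_min_le_mem (l : List Int) (b x : Int) (hx : x ∈ l) : l.foldl min b ≤ x := by
  induction l generalizing b with
  | nil => simp at hx
  | cons y l ih =>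
    rcases List.mem_cons.mp hx with rfl | hx'
    · exact le_trans (foldl_min_le_init l _) (min_le_right _ _)
    · exact ih _ hx'

lemma le_foldl_min (l : List Int) (b v : Int) (hb : v ≤ b) (h : ∀ x ∈ l, v ≤ x) :
    v ≤ l.foldl min b := by
  induction l generalizing b with
  | nil => simpa
  | cons x l ih =>
    exact ih _ (le_min hb (h x (by simp))) (fun y hy => h y (List.mem_cons_of_mem _ hy))

lemma foldl_congr_min (S : List (List Char)) (f : Int → List Char → Int)
    (cI : List Char → Int) (B : Int)
    (hf : ∀ b s, s ∈ S → b ≤ B → f b s = min b (cI s)) :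
    ∀ b, b ≤ B → S.foldl f b = (S.map cI).foldl min b := by
  induction S with
  | nil => intro b _; simp
  | cons s S' ih =>
    intro b hb
    rw [List.foldl_cons, List.map_cons, List.foldl_cons,
      hf b s (by simp) hb]
    exact ih (fun b' s' hs' hb' => hf b' s' (List.mem_cons_of_mem _ hs') hb') _
      (le_trans (min_le_left _ _) hb)

lemma take_append_piece (T : List Char) (i : Nat) (u : List Char) (hui : u.length ≤ i)
    (hud : (T.take i).drop (i - u.length) = u) : T.take (i - u.length) ++ u = T.take i := by
  have h2 : (T.take i).take (i - u.length) = T.take (i - u.length) := by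
    rw [List.take_take]; congr 1; omega
  conv_rhs => rw [← List.take_append_drop (i - u.length) (T.take i)]
  rw [h2, hud]

-- the inner fold of B computes the DP recurrence value
lemma bInner_eq (S : List (List Char)) (T : List Char) (i : Nat)
    (hS : ∀ s ∈ S, s ≠ []) (hi1 : 1 ≤ i) (hin : i ≤ T.length) :
    bInner S T ((List.range i).map (fun k => (mvN S T k : Int))) (i : Int)
      ((T.length : Int) + 1) = (mvN S T i : Int) := by
  have hlen_take : (T.take i).length = i := by
    rw [List.length_take]; omega
  -- the candidate value contributed by piece s
  have main : ∀ cI : List Char → Int, (cI = fun s =>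
      if s ≠ [] ∧ s.length ≤ i ∧ (T.take i).drop (i - s.length) = s
      then ((mvN S T (i - s.length) : Int) + 1) else ((T.length : Int) + 2)) →
      bInner S T ((List.range i).map (fun k => (mvN S T k : Int))) (i : Int)
        ((T.length : Int) + 1) = (mvN S T i : Int) := by
    intro cI hcI
    have hcIval : ∀ s, s ≠ [] → s.length ≤ i → (T.take i).drop (i - s.length) = s →
        cI s = (mvN S T (i - s.length) : Int) + 1 := by
      intro s h1 h2 h3; rw [hcI]; exact if_pos ⟨h1, h2, h3⟩
    have hcItop : ∀ s, ¬ (s ≠ [] ∧ s.length ≤ i ∧ (T.take i).drop (i - s.length) = s) →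
        cI s = (T.length : Int) + 2 := by
      intro s h; rw [hcI]; exact if_neg h
    -- step 1: the fold is a min-fold over the candidates
    have hfold : bInner S T ((List.range i).map (fun k => (mvN S T k : Int))) (i : Int)
        ((T.length : Int) + 1)
        = (S.map cI).foldl min ((T.length : Int) + 1) := by
      unfold bInner
      apply foldl_congr_min S _ cI ((T.length : Int) + 1) _ _ le_rfl
      intro b s hsS hb
      show (if 0 < (s.length : Int) ∧ (s.length : Int) ≤ (i : Int) ∧
          PySem.List.slice T (some ((i : Int) - (s.length : Int))) (some (i : Int)) = s ∧
          PySem.List.pyGetD ((List.range i).map (fun k => (mvN S T k : Int)))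
            ((i : Int) - (s.length : Int)) 0 + 1 < b then
        PySem.List.pyGetD ((List.range i).map (fun k => (mvN S T k : Int)))
          ((i : Int) - (s.length : Int)) 0 + 1
      else b) = min b (cI s)
      by_cases hval : s ≠ [] ∧ s.length ≤ i ∧ (T.take i).drop (i - s.length) = s
      · obtain ⟨hs0, hsi, hdrop⟩ := hval
        have hL1 : 0 < s.length := List.length_pos_iff.mpr hs0
        have hcast : (i : Int) - (s.length : Int) = ((i - s.length : Nat) : Int) := by omega
        have hget : PySem.List.pyGetD ((List.range i).map (fun k => (mvN S T k : Int)))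
            ((i : Int) - (s.length : Int)) 0 = (mvN S T (i - s.length) : Int) := by
          rw [hcast, PySem.List.pyGetD_natCast]
          exact PySem.List.getD_map_range _ i _ 0 (by omega)
        have hslice : PySem.List.slice T (some ((i : Int) - (s.length : Int)))
            (some (i : Int)) = s := by
          rw [hcast, PySem.List.slice_natCast]
          rw [List.drop_take] at hdrop
          exact hdrop
        rw [hcIval s hs0 hsi hdrop]
        split_ifs with hcond
        · obtain ⟨_, _, _, hlt⟩ := hcond
          rw [hget] at hlt ⊢
          exact (min_eq_right (le_of_lt hlt)).symm
        · have hnlt : ¬ (PySem.List.pyGetD ((List.range i).map (fun k => (mvN S T k : Int)))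
              ((i : Int) - (s.length : Int)) 0 + 1 < b) := by
            intro hlt
            exact hcond ⟨by exact_mod_cast hL1, by exact_mod_cast hsi, hslice, hlt⟩
          rw [hget] at hnlt
          exact (min_eq_left (by omega)).symm
      · have hcond : ¬ (0 < (s.length : Int) ∧ (s.length : Int) ≤ (i : Int) ∧
            PySem.List.slice T (some ((i : Int) - (s.length : Int))) (some (i : Int)) = s ∧
            PySem.List.pyGetD ((List.range i).map (fun k => (mvN S T k : Int)))
              ((i : Int) - (s.length : Int)) 0 + 1 < b) := by
          rintro ⟨h1, h2, h3, _⟩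
          apply hval
          have hsi : s.length ≤ i := by exact_mod_cast h2
          have hs0 : s ≠ [] := List.length_pos_iff.mp (by exact_mod_cast h1)
          refine ⟨hs0, hsi, ?_⟩
          rw [show (i : Int) - (s.length : Int) = ((i - s.length : Nat) : Int) from by omega,
            PySem.List.slice_natCast] at h3
          rw [List.drop_take, show i - (i - s.length) = s.length from by omega]
          rw [show i - (i - s.length) = s.length from by omega] at h3
          exact h3
        rw [if_neg hcond, hcItop s hval]
        exact (min_eq_left (by omega)).symm
    rw [hfold]
    -- step 2: the min-fold equals mvN i
    by_cases hex : ∃ k, reachB S k (T.take i) = true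
    · -- reachable: the minimum is attained by the last piece of an optimal decomposition
      have hk0 : Reach S (mvN S T i) (T.take i) := mvN_reach S T i hex
      have hk0i : mvN S T i ≤ i := by
        have := reach_le_length S _ _ hS hk0
        omega
      have hk0pos : 1 ≤ mvN S T i := by
        by_contra h
        have h0 : mvN S T i = 0 := by omega
        rw [h0] at hk0
        have := congrArg List.length (reach_zero S _ hk0)
        rw [hlen_take] at this
        simp at this; omega
      obtain ⟨w', s, hsS, hr', hws⟩ := (reach_succ_iff S (mvN S T i - 1) (T.take i)).mp
        (by rw [show mvN S T i - 1 + 1 = mvN S T i from by omega]; exact hk0)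
      have hs0 : s ≠ [] := hS s hsS
      have hlens : (T.take i).length = w'.length + s.length := by
        rw [hws, List.length_append]
      have hsl : s.length ≤ i := by rw [hlen_take] at hlens; omega
      have hlenw : w'.length = i - s.length := by rw [hlen_take] at hlens; omega
      have hw' : w' = T.take (i - s.length) := by
        calc w' = (T.take i).take w'.length := List.prefix_iff_eq_take.mp ⟨s, hws.symm⟩
        _ = T.take (i - s.length) := by
            rw [hlenw, List.take_take]; congr 1; omega
      have hdrop : (T.take i).drop (i - s.length) = s := by
        rw [show T.take i = w' ++ s from hws, ← hlenw, List.drop_left]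
      have hcand : cI s = (mvN S T (i - s.length) : Int) + 1 := hcIval s hs0 hsl hdrop
      have hmv' : mvN S T (i - s.length) ≤ mvN S T i - 1 := by
        apply mvN_le_of_reach
        rw [← hw']; exact hr'
      have hub : (S.map cI).foldl min ((T.length : Int) + 1) ≤ (mvN S T i : Int) := by
        refine le_trans (foldl_min_le_mem _ _ (cI s) (List.mem_map_of_mem hsS)) ?_
        rw [hcand]
        omega
      have hlb : ∀ x ∈ S.map cI, (mvN S T i : Int) ≤ x := by
        intro x hx
        obtain ⟨u, huS, rfl⟩ := List.mem_map.mp hx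
        by_cases hval : u ≠ [] ∧ u.length ≤ i ∧ (T.take i).drop (i - u.length) = u
        · obtain ⟨hu0, hui, hud⟩ := hval
          rw [hcIval u hu0 hui hud]
          by_cases hex' : ∃ k, reachB S k (T.take (i - u.length)) = true
          · have h1 : Reach S (mvN S T (i - u.length)) (T.take (i - u.length)) :=
              mvN_reach _ _ _ hex'
            have happ := take_append_piece T i u hui hud
            have hr2 : Reach S (mvN S T (i - u.length) + 1) (T.take i) := by
              rw [← happ]; exact Reach.snoc huS h1
            have := mvN_le_of_reach S T i _ hr2
            omega
          · rw [mvN_eq_top _ _ _ hex']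
            omega
        · rw [hcItop u hval]
          omega
      have hlb2 : (mvN S T i : Int) ≤ (T.length : Int) + 1 := by omega
      exact le_antisymm hub (le_foldl_min _ _ _ hlb2 hlb)
    · -- unreachable: every candidate stays at the sentinel
      rw [mvN_eq_top _ _ _ hex]
      have hlb : ∀ x ∈ S.map cI, ((T.length : Int) + 1) ≤ x := by
        intro x hx
        obtain ⟨u, huS, rfl⟩ := List.mem_map.mp hx
        by_cases hval : u ≠ [] ∧ u.length ≤ i ∧ (T.take i).drop (i - u.length) = u
        · obtain ⟨hu0, hui, hud⟩ := hval
          rw [hcIval u hu0 hui hud]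
          by_cases hex' : ∃ k, reachB S k (T.take (i - u.length)) = true
          · exfalso
            apply hex
            have h1 : Reach S (mvN S T (i - u.length)) (T.take (i - u.length)) :=
              mvN_reach _ _ _ hex'
            have happ := take_append_piece T i u hui hud
            refine ⟨mvN S T (i - u.length) + 1, (reachB_iff _ _ _).mpr ?_⟩
            rw [← happ]; exact Reach.snoc huS h1
          · rw [mvN_eq_top _ _ _ hex']
            omega
        · rw [hcItop u hval]
          omega
      have h1 := le_foldl_min (S.map cI) ((T.length : Int) + 1) ((T.length : Int) + 1) le_rfl hlb
      have h2 := foldl_min_le_init (S.map cI) ((T.length : Int) + 1)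
      push_cast
      omega
  exact main _ rfl

lemma pre_facts (strs : List String) (t : String) (hPre : Pre_solution strs t) :
    t.toList ≠ [] ∧ ∀ s ∈ strs.map String.toList, s ≠ [] := by
  obtain ⟨h1, h2⟩ := hPre
  constructor
  · intro h; exact h1 (String.toList_eq_nil_iff.mp h)
  · intro s hs hnil
    obtain ⟨x, hx, rfl⟩ := List.mem_map.mp hs
    have : x = "" := String.toList_eq_nil_iff.mp hnil
    subst this
    exact h2 hx

-- the outer fold of B fills best with the DP values
lemma bBest (S : List (List Char)) (T : List Char) (hS : ∀ s ∈ S, s ≠ []) :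
    ∀ m, m ≤ T.length →
      (PySem.List.pyRange 1 ((m : Int) + 1) 1).foldl
        (fun best i => best ++ [bInner S T best i ((T.length : Int) + 1)]) [(0 : Int)]
      = (List.range (m+1)).map (fun k => (mvN S T k : Int)) := by
  intro m
  induction m with
  | zero =>
    intro _
    norm_num
    simp [mvN_zero]
  | succ m ih =>
    intro hm
    have hrange : PySem.List.pyRange 1 (((m+1 : Nat) : Int) + 1) 1
        = PySem.List.pyRange 1 ((m : Int) + 1) 1 ++ [(m : Int) + 1] := by
      push_cast
      exact PySem.List.pyRange_one_succ_right (by omega)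
    rw [hrange, List.foldl_append, ih (by omega)]
    have hb := bInner_eq S T (m+1) hS (by omega) (by omega)
    rw [show (((m+1 : Nat)) : Int) = (m : Int) + 1 from by push_cast; ring] at hb
    rw [List.foldl_cons, List.foldl_nil, hb]
    rw [List.range_succ (n := m + 1), List.map_append]
    rfl

lemma find_take_length (S : List (List Char)) (T : List Char)
    (h : ∃ k, reachB S k T = true) :
    mvN S T T.length = Nat.find h := by
  have hTT : T.take T.length = T := List.take_length
  have h' : ∃ k, reachB S k (T.take T.length) = true := by rw [hTT]; exact h
  rw [mvN_eq_find S T _ h']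
  apply le_antisymm
  · apply Nat.find_le
    rw [hTT]
    exact Nat.find_spec h
  · apply Nat.find_le
    set k0 := Nat.find h' with hk0
    have hsp : reachB S k0 (T.take T.length) = true := Nat.find_spec h'
    rw [hTT] at hsp
    exact hsp

lemma b_char_some (strs : List String) (t : String) (hPre : Pre_solution strs t)
    (h : ∃ k, reachB (strs.map String.toList) k t.toList = true) :
    solution_alt strs t = (Nat.find h : Int) := by
  obtain ⟨hT, hS⟩ := pre_facts strs t hPre
  have hfind := find_take_length (strs.map String.toList) t.toList h
  have hlt : mvN (strs.map String.toList) t.toList t.toList.length ≤ t.toList.length := by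
    rw [hfind]
    have hr := (reachB_iff _ _ _).mp (Nat.find_spec h)
    exact reach_le_length _ _ _ hS hr
  simp only [solution_alt]
  rw [bBest (strs.map String.toList) t.toList hS t.toList.length le_rfl]
  rw [PySem.List.pyGetD_natCast]
  rw [PySem.List.getD_map_range _ (t.toList.length + 1) _ 0 (by omega)]
  rw [if_pos (by exact_mod_cast by omega : (mvN (strs.map String.toList) t.toList t.toList.length : Int) < (t.toList.length : Int) + 1)]
  exact_mod_cast hfind

lemma b_char_none (strs : List String) (t : String) (hPre : Pre_solution strs t)
    (h : ¬ ∃ k, reachB (strs.map String.toList) k t.toList = true) :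
    solution_alt strs t = -1 := by
  obtain ⟨hT, hS⟩ := pre_facts strs t hPre
  have htop : mvN (strs.map String.toList) t.toList t.toList.length = t.toList.length + 1 := by
    apply mvN_eq_top
    rw [List.take_length]
    exact h
  simp only [solution_alt]
  rw [bBest (strs.map String.toList) t.toList hS t.toList.length le_rfl]
  rw [PySem.List.pyGetD_natCast]
  rw [PySem.List.getD_map_range _ (t.toList.length + 1) _ 0 (by omega)]
  rw [if_neg (by rw [htop]; push_cast; omega)]

lemma aLoop_eq (strs : List String) (t : String) (hPre : Pre_solution strs t) :
    ∀ (fuel j : Nat) (dp : PySem.Dict (List Char) Int),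
      InvA (strs.map String.toList) t.toList j dp →
      (∀ m, 1 ≤ m → m ≤ j → ¬ Reach (strs.map String.toList) m t.toList) →
      t.toList.length < fuel + j →
      aLoop (strs.map String.toList) t.toList (t.toList.length : Int) fuel dp
        = solution_alt strs t := by
  obtain ⟨hT, hS⟩ := pre_facts strs t hPre
  intro fuel
  induction fuel with
  | zero =>
    intro j dp hInv hNot hfj
    obtain ⟨hmem, hval⟩ := hInv
    cases j with
    | zero => omega
    | succ j' =>
      have hempty : ∀ w, ¬ Phi (strs.map String.toList) t.toList (j'+1) w := by
        rintro w ⟨hpre, hr⟩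
        have h1 := reach_le_length _ _ _ hS hr
        have h2 := hpre.length_le
        omega
      have hnone : ¬ ∃ k, reachB (strs.map String.toList) k t.toList = true := by
        rintro ⟨k, hk⟩
        have hrk := (reachB_iff _ _ _).mp hk
        rcases Nat.lt_or_ge k (j' + 2) with hklt | hkge
        · rcases Nat.eq_zero_or_pos k with rfl | hk1
          · exact hT (reach_zero _ _ hrk)
          · exact hNot k hk1 (by omega) hrk
        · obtain ⟨w', hw'pre, hw'r⟩ := reach_prefix _ k (j'+2) _ hrk hkge
          exact hempty w' ⟨hw'pre, hw'r⟩
      rw [b_char_none strs t hPre hnone]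
      rfl
  | succ fuel ih =>
    intro j dp hInv hNot hfj
    obtain ⟨hmem, hval⟩ := hInv
    cases hg : dp.get? t.toList with
    | some v =>
      have hv : v = (j : Int) + 1 := hval _ _ hg
      have hPhi : Phi (strs.map String.toList) t.toList j t.toList := by
        apply (hmem _).mp
        rw [hg, hv]
      have hr : Reach (strs.map String.toList) (j+1) t.toList := by
        cases j with
        | zero => exact (reach_one _ _).mpr hPhi
        | succ j' => exact hPhi.2
      have h : ∃ k, reachB (strs.map String.toList) k t.toList = true :=
        ⟨j+1, (reachB_iff _ _ _).mpr hr⟩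
      have hfind : Nat.find h = j + 1 := by
        rw [Nat.find_eq_iff]
        refine ⟨(reachB_iff _ _ _).mpr hr, ?_⟩
        intro m hm hmB
        have hrm := (reachB_iff _ _ _).mp hmB
        rcases Nat.eq_zero_or_pos m with rfl | hm1
        · exact hT (reach_zero _ _ hrm)
        · exact hNot m hm1 (by omega) hrm
      rw [b_char_some strs t hPre h, hfind]
      simp only [aLoop, hg]
      rw [hv]
      push_cast
      ring
    | none =>
      have hnPhi : ¬ Phi (strs.map String.toList) t.toList j t.toList := by
        intro hPhi
        have := (hmem _).mpr hPhi
        rw [hg] at this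
        simp at this
      have hnr : ¬ Reach (strs.map String.toList) (j+1) t.toList := by
        intro hr
        apply hnPhi
        cases j with
        | zero => exact (reach_one _ _).mp hr
        | succ j' => exact ⟨List.prefix_refl _, hr⟩
      have hNot' : ∀ m, 1 ≤ m → m ≤ j + 1 →
          ¬ Reach (strs.map String.toList) m t.toList := by
        intro m h1 h2
        rcases Nat.lt_or_ge m (j+1) with hlt | hge
        · exact hNot m h1 (by omega)
        · have : m = j + 1 := by omega
          subst this
          exact hnr
      have hInv' := aStep_inv (strs.map String.toList) t.toList j dp ⟨hmem, hval⟩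
      by_cases hsz : (aStep (strs.map String.toList) t.toList (t.toList.length : Int) dp).size = 0
      · have hkeys0 : ∀ w, (aStep (strs.map String.toList) t.toList (t.toList.length : Int) dp).get? w = none := by
          intro w
          rw [PySem.Dict.get?_eq_none_iff_not_mem_keys]
          intro hw
          have : ((aStep (strs.map String.toList) t.toList (t.toList.length : Int) dp).keys).length ≠ 0 := by
            intro h0
            rw [List.length_eq_zero_iff] at h0
            rw [h0] at hw
            simp at hw
          apply this
          simp only [PySem.Dict.keys, PySem.Dict.size] at *
          simpa using hsz
        have hempty : ∀ w, ¬ Phi (strs.map String.toList) t.toList (j+1) w := by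
          intro w hw
          have := (hInv'.1 w).mpr hw
          rw [hkeys0 w] at this
          simp at this
        have hnone : ¬ ∃ k, reachB (strs.map String.toList) k t.toList = true := by
          rintro ⟨k, hk⟩
          have hrk := (reachB_iff _ _ _).mp hk
          rcases Nat.lt_or_ge k (j + 2) with hklt | hkge
          · rcases Nat.eq_zero_or_pos k with rfl | hk1
            · exact hT (reach_zero _ _ hrk)
            · exact hNot' k hk1 (by omega) hrk
          · obtain ⟨w', hw'pre, hw'r⟩ := reach_prefix _ k (j+2) _ hrk hkge
            exact hempty w' ⟨hw'pre, hw'r⟩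
        rw [b_char_none strs t hPre hnone]
        simp only [aLoop, hg]
        rw [if_pos hsz]
      · have hne : ∃ w, Phi (strs.map String.toList) t.toList (j+1) w := by
          have hkne : (aStep (strs.map String.toList) t.toList (t.toList.length : Int) dp).keys ≠ [] := by
            intro h0
            apply hsz
            simp only [PySem.Dict.keys] at h0
            simp only [PySem.Dict.size]
            simpa using congrArg List.length h0
          obtain ⟨w, hw⟩ := List.exists_mem_of_ne_nil _ hkne
          have hgw : (aStep (strs.map String.toList) t.toList (t.toList.length : Int) dp).get? w ≠ none := by
            intro hn
            rw [PySem.Dict.get?_eq_none_iff_not_mem_keys] at hn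
            exact hn hw
          cases hgw2 : (aStep (strs.map String.toList) t.toList (t.toList.length : Int) dp).get? w with
          | none => exact absurd hgw2 hgw
          | some v =>
            have := hInv'.2 _ _ hgw2
            subst this
            exact ⟨w, (hInv'.1 w).mp hgw2⟩
        obtain ⟨w, hwpre, hwr⟩ := hne
        have hbound : j + 2 ≤ t.toList.length := by
          have h1 := reach_le_length _ _ _ hS hwr
          have h2 := hwpre.length_le
          omega
        have := ih (j+1) (aStep (strs.map String.toList) t.toList (t.toList.length : Int) dp)
          hInv' hNot' (by omega)
        simp only [aLoop, hg]
        rw [if_neg hsz]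
        exact this

-- ===== VERDICT (by name: the statement is the Claim_ definition above) =====
theorem solution_spec : Claim_equal_solution := by
  intro strs t _hDom hPre
  unfold Spec_solution
  obtain ⟨hT, hS⟩ := pre_facts strs t hPre
  show aLoop (strs.map String.toList) t.toList (t.toList.length : Int) (t.toList.length + 1)
      ((strs.map String.toList).foldl (fun d s => d.insert s 1) PySem.Dict.empty)
    = solution_alt strs t
  apply aLoop_eq strs t hPre (t.toList.length + 1) 0
  · constructor
    · intro w
      rw [aInit_get_aux, PySem.Dict.get?_empty]
      by_cases hw : w ∈ strs.map String.toList
      · simp [hw, Phi]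
      · simp [hw, Phi]
    · intro w v hv
      rw [aInit_get_aux, PySem.Dict.get?_empty] at hv
      by_cases hw : w ∈ strs.map String.toList
      · rw [if_pos hw] at hv
        norm_num
        exact (Option.some_inj.mp hv).symm
      · rw [if_neg hw] at hv
        exact absurd hv (by simp)
  · intro m h1 h2
    omega
  · omega
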